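-- pv_equiv track=rewrite | github.com/russellmoss/salesforce-rag-bot | src/pipeline/build_schema_library_end_to_end_original.py | create_profile_markdown_summary
-- ===== SOURCE A (Python) =====
-- from typing import List, Dict, Any, Optional, Tuple, Set
--
-- def create_profile_markdown_summary(profiles: List[dict]) -> str:
--     """Create a markdown summary of profiles."""
--     if not profiles:
--         return "# Profiles\n\nNo profiles found."
--
--     markdown = "# Profiles\n\n"
--     markdown += f"Total profiles: {len(profiles)}\n\n"
--
--     # Group by user type
--     user_types = {}
--     for profile in profiles:
--         user_type = profile.get('UserType', 'Unknown')
--         if user_type not in user_types: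
--             user_types[user_type] = []
--         user_types[user_type].append(profile)
--
--     for user_type, type_profiles in user_types.items():
--         markdown += f"## {user_type} Profiles ({len(type_profiles)})\n\n"
--
--         for profile in sorted(type_profiles, key=lambda x: x.get('Name', '')):
--             name = profile.get('Name', 'Unknown')
--             description = profile.get('Description', '')
--
--             markdown += f"### {name}\n\n"
--             if description:
--                 markdown += f"{description}\n\n"
--
--             # Add metadata
--             metadata_items = []
--             if profile.get('UserType'):
--                 metadata_items.append(f"**User Type:** {profile['UserType']}")
--             if profile.get('UserLicenseId'):
--                 metadata_items.append(f"**License:** {profile['UserLicenseId']}")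
--
--             if metadata_items:
--                 markdown += "**Metadata:** " + " | ".join(metadata_items) + "\n\n"
--
--         markdown += "---\n\n"
--
--     return markdown
-- ===== SOURCE B (Python) =====
-- def _section(p):
--     out = f"### {p.get('Name', 'Unknown')}\n\n"
--     desc = p.get('Description', '')
--     if desc:
--         out += f"{desc}\n\n"
--     meta = [f"**{label}:** {p[key]}"
--             for key, label in (('UserType', 'User Type'), ('UserLicenseId', 'License'))
--             if p.get(key)]
--     if meta:
--         out += "**Metadata:** " + " | ".join(meta) + "\n\n"
--     return out
--
--
-- def create_profile_markdown_summary(profiles):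
--     """Create a markdown summary of profiles."""
--     if not profiles:
--         return "# Profiles\n\nNo profiles found."
--     order = list(dict.fromkeys(p.get('UserType', 'Unknown') for p in profiles))
--     parts = ["# Profiles\n\n", f"Total profiles: {len(profiles)}\n\n"]
--     for ut in order:
--         group = sorted((p for p in profiles if p.get('UserType', 'Unknown') == ut),
--                        key=lambda p: p.get('Name', ''))
--         parts.append(f"## {ut} Profiles ({len(group)})\n\n")
--         parts.extend(_section(p) for p in group)
--         parts.append("---\n\n")
--     return "".join(parts)
-- ===== Notes on version B (the rewrite author's own statement) =====
-- stated objective: alternative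
-- what changed: B replaces A's mutable dict-of-lists grouping and string-accumulator loops by an ordered dedup of user types, a filtered+sorted pass per type, and a joined parts list built with a per-profile section helper.
import Mathlib
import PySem

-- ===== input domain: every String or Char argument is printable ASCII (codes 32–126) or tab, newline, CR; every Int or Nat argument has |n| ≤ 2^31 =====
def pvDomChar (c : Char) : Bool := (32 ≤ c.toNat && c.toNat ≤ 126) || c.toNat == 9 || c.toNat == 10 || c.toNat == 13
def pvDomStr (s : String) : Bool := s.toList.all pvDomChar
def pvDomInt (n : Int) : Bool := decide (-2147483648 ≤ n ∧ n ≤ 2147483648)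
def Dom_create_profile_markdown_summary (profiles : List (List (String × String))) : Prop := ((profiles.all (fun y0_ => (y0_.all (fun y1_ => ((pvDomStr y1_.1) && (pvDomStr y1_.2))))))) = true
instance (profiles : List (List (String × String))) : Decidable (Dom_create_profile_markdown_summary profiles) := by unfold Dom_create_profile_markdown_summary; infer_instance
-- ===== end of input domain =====

-- B re-groups by ordered-dedup of user types + one filtered, sorted pass per type and joins a parts list,
-- instead of A's mutable dict-of-lists grouping with string accumulation; objective: alternative decomposition (no speed claim).

-- shared primitive: Python's `profile.get(k, dflt)` on the dict passed in as an association list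
def pvGetD (p : List (String × String)) (k dflt : String) : String :=
  (PySem.Dict.ofList p).getD k dflt

-- ===== PORT A =====
def create_profile_markdown_summary (profiles : List (List (String × String))) : String :=
  if profiles = [] then
    "# Profiles\n\nNo profiles found."
  else
    let markdown := "# Profiles\n\n"
    let markdown := markdown ++ "Total profiles: " ++ PySem.Int.toStr (profiles.length : Int) ++ "\n\n"
    let user_types : PySem.Dict String (List (List (String × String))) :=
      profiles.foldl (fun d profile =>
        let user_type := pvGetD profile "UserType" "Unknown"
        let d := if d.contains user_type then d else d.insert user_type []
        d.modify user_type [] (fun l => l ++ [profile])) PySem.Dict.empty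
    user_types.items.foldl (fun markdown ut =>
      let markdown := markdown ++ "## " ++ ut.1 ++ " Profiles (" ++ PySem.Int.toStr (ut.2.length : Int) ++ ")\n\n"
      let markdown := (PySem.List.sorted ut.2 (fun x => pvGetD x "Name" "") false).foldl (fun markdown profile =>
        let name := pvGetD profile "Name" "Unknown"
        let description := pvGetD profile "Description" ""
        let markdown := markdown ++ "### " ++ name ++ "\n\n"
        let markdown := if description ≠ "" then markdown ++ description ++ "\n\n" else markdown
        let metadata_items : List String := []
        let metadata_items := if pvGetD profile "UserType" "" ≠ "" then
            metadata_items ++ ["**User Type:** " ++ pvGetD profile "UserType" ""] else metadata_items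
        let metadata_items := if pvGetD profile "UserLicenseId" "" ≠ "" then
            metadata_items ++ ["**License:** " ++ pvGetD profile "UserLicenseId" ""] else metadata_items
        if metadata_items ≠ [] then
          markdown ++ "**Metadata:** " ++ PySem.Str.join " | " metadata_items ++ "\n\n"
        else markdown) markdown
      markdown ++ "---\n\n") markdown

-- ===== PORT B =====
def pvSection (p : List (String × String)) : String :=
  let out := "### " ++ pvGetD p "Name" "Unknown" ++ "\n\n"
  let desc := pvGetD p "Description" ""
  let out := if desc ≠ "" then out ++ desc ++ "\n\n" else out
  let metaItems := ([("UserType", "User Type"), ("UserLicenseId", "License")].filter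
      (fun kl => pvGetD p kl.1 "" ≠ "")).map (fun kl => "**" ++ kl.2 ++ ":** " ++ pvGetD p kl.1 "")
  if metaItems ≠ [] then out ++ "**Metadata:** " ++ PySem.Str.join " | " metaItems ++ "\n\n" else out

def create_profile_markdown_summary_alt (profiles : List (List (String × String))) : String :=
  if profiles = [] then
    "# Profiles\n\nNo profiles found."
  else
    let order := PySem.List.dedup (profiles.map (fun p => pvGetD p "UserType" "Unknown"))
    let parts := ["# Profiles\n\n", "Total profiles: " ++ PySem.Int.toStr (profiles.length : Int) ++ "\n\n"]
      ++ order.flatMap (fun ut =>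
          let group := PySem.List.sorted
            (profiles.filter (fun p => pvGetD p "UserType" "Unknown" == ut))
            (fun p => pvGetD p "Name" "") false
          ("## " ++ ut ++ " Profiles (" ++ PySem.Int.toStr (group.length : Int) ++ ")\n\n")
            :: (group.map pvSection ++ ["---\n\n"]))
    PySem.Str.join "" parts

-- ===== PRECONDITION & SPEC =====
def Spec_create_profile_markdown_summary (profiles : List (List (String × String))) (out : String) : Prop := out = create_profile_markdown_summary_alt profiles
instance (profiles : List (List (String × String))) (out : String) : Decidable (Spec_create_profile_markdown_summary profiles out) := by unfold Spec_create_profile_markdown_summary; infer_instance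

-- ===== CLAIM (what is proved, stated in full; the proofs are below) =====
def Claim_equal_create_profile_markdown_summary : Prop := ∀ (profiles : List (List (String × String))), Dom_create_profile_markdown_summary profiles → Spec_create_profile_markdown_summary profiles (create_profile_markdown_summary profiles)

-- ===== LEMMAS AND PROOFS =====

-- names for the two loop bodies of port A (definitionally the lambdas appearing in it)
def pvChunkA (markdown : String) (profile : List (String × String)) : String :=
  let name := pvGetD profile "Name" "Unknown"
  let description := pvGetD profile "Description" ""
  let markdown := markdown ++ "### " ++ name ++ "\n\n"
  let markdown := if description ≠ "" then markdown ++ description ++ "\n\n" else markdown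
  let metadata_items : List String := []
  let metadata_items := if pvGetD profile "UserType" "" ≠ "" then
      metadata_items ++ ["**User Type:** " ++ pvGetD profile "UserType" ""] else metadata_items
  let metadata_items := if pvGetD profile "UserLicenseId" "" ≠ "" then
      metadata_items ++ ["**License:** " ++ pvGetD profile "UserLicenseId" ""] else metadata_items
  if metadata_items ≠ [] then
    markdown ++ "**Metadata:** " ++ PySem.Str.join " | " metadata_items ++ "\n\n"
  else markdown

def pvOuterA (markdown : String) (ut : String × List (List (String × String))) : String :=
  let markdown := markdown ++ "## " ++ ut.1 ++ " Profiles (" ++ PySem.Int.toStr (ut.2.length : Int) ++ ")\n\n"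
  let markdown := (PySem.List.sorted ut.2 (fun x => pvGetD x "Name" "") false).foldl pvChunkA markdown
  markdown ++ "---\n\n"

def pvKey (p : List (String × String)) : String := pvGetD p "UserType" "Unknown"

def pvGroups (profiles : List (List (String × String))) : PySem.Dict String (List (List (String × String))) :=
  profiles.foldl (fun d profile =>
    let user_type := pvGetD profile "UserType" "Unknown"
    let d := if d.contains user_type then d else d.insert user_type []
    d.modify user_type [] (fun l => l ++ [profile])) PySem.Dict.empty

theorem pvA_eq (profiles : List (List (String × String))) (h : profiles ≠ []) :
    create_profile_markdown_summary profiles =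
      (pvGroups profiles).items.foldl pvOuterA
        ("# Profiles\n\n" ++ "Total profiles: " ++ PySem.Int.toStr (profiles.length : Int) ++ "\n\n") := by
  simp only [create_profile_markdown_summary, if_neg h]
  rfl

-- ''.join basics
theorem pvCharsJoin_nil : ∀ (l : List (List Char)), PySem.Chars.join [] l = l.flatten
  | [] => rfl
  | [x] => by simp [PySem.Chars.join, List.intercalate]
  | x :: y :: ys => by
      have ih := pvCharsJoin_nil (y :: ys)
      simp only [PySem.Chars.join, List.intercalate] at ih ⊢
      simp [List.intersperse, ih]

theorem pvJoin_nil : PySem.Str.join "" [] = "" := rfl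

theorem pvJoin_cons (x : String) (xs : List String) :
    PySem.Str.join "" (x :: xs) = x ++ PySem.Str.join "" xs := by
  simp [PySem.Str.join, pvCharsJoin_nil]

theorem pvJoin_append (a b : List String) :
    PySem.Str.join "" (a ++ b) = PySem.Str.join "" a ++ PySem.Str.join "" b := by
  induction a with
  | nil => simp [PySem.Str.join]
  | cons x xs ih => simp [pvJoin_cons, ih, String.append_assoc]

theorem pvLitUT (v : String) : "**" ++ ("User Type" ++ (":** " ++ v)) = "**User Type:** " ++ v := by
  rw [← String.append_assoc, ← String.append_assoc]
  rfl

theorem pvLitLic (v : String) : "**" ++ ("License" ++ (":** " ++ v)) = "**License:** " ++ v := by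
  rw [← String.append_assoc, ← String.append_assoc]
  rfl

theorem pvChunk_eq (md : String) (p : List (String × String)) :
    pvChunkA md p = md ++ pvSection p := by
  unfold pvChunkA pvSection
  by_cases h1 : pvGetD p "Description" "" ≠ "" <;>
  by_cases h2 : pvGetD p "UserType" "" ≠ "" <;>
  by_cases h3 : pvGetD p "UserLicenseId" "" ≠ "" <;>
  simp [h1, h2, h3, List.filter, String.append_assoc, pvLitUT, pvLitLic]

theorem pvSecfold (group : List (List (String × String))) (md0 : String) :
    group.foldl pvChunkA md0 = md0 ++ PySem.Str.join "" (group.map pvSection) := by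
  induction group generalizing md0 with
  | nil => simp [pvJoin_nil]
  | cons p rest ih => simp [List.foldl_cons, pvChunk_eq, ih, pvJoin_cons, String.append_assoc]

theorem pvOuterfold (L : List (String × List (List (String × String)))) (md0 : String) :
    L.foldl pvOuterA md0 = md0 ++ PySem.Str.join "" (L.flatMap (fun pr =>
      ("## " ++ pr.1 ++ " Profiles (" ++ PySem.Int.toStr (pr.2.length : Int) ++ ")\n\n")
        :: ((PySem.List.sorted pr.2 (fun x => pvGetD x "Name" "") false).map pvSection ++ ["---\n\n"]))) := by
  induction L generalizing md0 with
  | nil => simp [pvJoin_nil]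
  | cons pr rest ih =>
    simp only [List.foldl_cons, List.flatMap_cons, ih, pvJoin_cons, pvJoin_append]
    unfold pvOuterA
    simp [pvSecfold, pvJoin_nil, String.append_assoc]

theorem pvGroups_items (profiles : List (List (String × String))) :
    (pvGroups profiles).items =
      (PySem.List.dedup (profiles.map pvKey)).map
        (fun c => (c, profiles.filter (fun p => pvKey p == c))) := by
  have hfold : pvGroups profiles =
      profiles.foldl (fun d p => d.modify (pvKey p) [] (fun l => l ++ [p])) PySem.Dict.empty := by
    unfold pvGroups
    congr 1
    funext d p
    simp only [pvKey]
    by_cases h : d.contains (pvGetD p "UserType" "Unknown") = true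
    · simp [h]
    · simp only [Bool.not_eq_true] at h
      simp [h, PySem.Dict.modify, PySem.Dict.getD_insert_self,
        PySem.Dict.insert_insert_self, PySem.Dict.getD_of_not_contains _ _ h]
  rw [hfold]
  have hnodup : (profiles.foldl (fun d p => d.modify (pvKey p) [] (fun l => l ++ [p]))
      PySem.Dict.empty).keys.Nodup := by
    apply PySem.Dict.nodup_keys_foldl_modify_key
    simp [PySem.Dict.keys_empty]
  have hkeys : (profiles.foldl (fun d p => d.modify (pvKey p) [] (fun l => l ++ [p]))
      PySem.Dict.empty).keys = PySem.List.dedup (profiles.map pvKey) := by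
    rw [PySem.Dict.keys_foldl_modify_key]
    simp [PySem.Dict.keys_empty, PySem.List.dedup_eq_ofList]
    rfl
  rw [PySem.Dict.items_eq_map_keys _ hnodup [], hkeys]
  apply List.map_congr_left
  intro c _
  have hmap : profiles.foldl (fun d p => d.modify (pvKey p) [] (fun l => l ++ [p])) PySem.Dict.empty
      = (profiles.map (fun p => (pvKey p, p))).foldl
          (fun d q => d.modify q.1 [] (fun l => l ++ [q.2])) PySem.Dict.empty := by
    rw [List.foldl_map]
  rw [hmap, PySem.Dict.getD_foldl_modify_append, List.filter_map]
  simp [Function.comp_def]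

-- ===== VERDICT (by name: the statement is the Claim_ definition above) =====
theorem create_profile_markdown_summary_spec : Claim_equal_create_profile_markdown_summary := by
  intro profiles _
  unfold Spec_create_profile_markdown_summary
  by_cases h : profiles = []
  · subst h; rfl
  · rw [pvA_eq profiles h, pvGroups_items, pvOuterfold]
    simp only [create_profile_markdown_summary_alt, if_neg h]
    rw [List.flatMap_map]
    simp only [pvKey, PySem.List.length_sorted, List.cons_append, List.nil_append,
      pvJoin_cons, String.append_assoc]
    rfl
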